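-- pv_equiv track=rewrite | github.com/VidhyaPonnusamy-gce/Mount-Blue-job-challenge-codes | Mount-blue-sec9-9.py | priyanka_toys
-- ===== SOURCE A (Python) =====
-- def priyanka_toys(arr):
--     arr.sort()
--     min_wght=arr[0]
--     count=1
--     for i in arr:
--         if i>min_wght+4:
--             count+=1
--             min_wght=i
--     return count
-- ===== SOURCE B (Python) =====
-- def priyanka_toys(arr):
--     arr.sort()
--     n = len(arr)
--     count = 0
--     i = 0
--     while i < n:
--         limit = arr[i] + 4
--         lo = i + 1
--         hi = n
--         while lo < hi:          # hand-rolled bisect_right: first index with arr[idx] > limit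
--             mid = (lo + hi) // 2
--             if arr[mid] <= limit:
--                 lo = mid + 1
--             else:
--                 hi = mid
--         count += 1
--         i = lo
--     return count
-- ===== Notes on version B (the rewrite author's own statement) =====
-- stated objective: alternative
-- what changed: A sorts and then makes one conditional pass testing every element against the current anchor; B sorts and then jumps from group to group, finding the end of each group with a hand-rolled binary search (bisect_right for anchor+4), so elements inside a group are never examined individually.
import Mathlib
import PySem

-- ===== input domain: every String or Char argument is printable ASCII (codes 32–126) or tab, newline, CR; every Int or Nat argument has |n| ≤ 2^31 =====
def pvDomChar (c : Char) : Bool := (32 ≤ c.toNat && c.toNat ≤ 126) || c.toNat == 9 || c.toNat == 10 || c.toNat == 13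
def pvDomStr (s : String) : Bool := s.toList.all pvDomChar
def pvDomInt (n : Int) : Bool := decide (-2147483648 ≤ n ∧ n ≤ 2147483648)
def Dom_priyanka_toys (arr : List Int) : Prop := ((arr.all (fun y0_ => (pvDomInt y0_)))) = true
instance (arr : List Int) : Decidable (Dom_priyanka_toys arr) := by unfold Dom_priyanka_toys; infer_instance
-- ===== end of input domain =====

-- B replaces A's per-element conditional scan by group-to-group jumps: a hand-rolled
-- binary search finds the end of each group; objective: alternative decomposition.
-- NOTE: both A and B sort the argument list in place; the equivalence proved here is
-- about the return value only.

-- ===== PORT A =====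
-- arr.sort(); min_wght = arr[0]; count = 1; for i in arr: if i > min_wght+4: count,min_wght = count+1,i
def priyanka_toys (arr : List Int) : Int :=
  let s := PySem.List.sorted arr (fun x => x) false
  match s with
  | [] => 0   -- unreachable under Pre_: Python raises IndexError reading arr[0]
  | m :: _ =>
    (s.foldl (fun (st : Int × Int) i => if st.1 + 4 < i then (i, st.2 + 1) else st) (m, 1)).2

-- ===== PORT B =====
-- inner 'while lo < hi: mid=(lo+hi)//2; if arr[mid]<=limit: lo=mid+1 else: hi=mid'
-- (every index read is in range, so List.getD transcribes arr[mid] exactly; the fuel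
--  argument only makes the loop total — it starts at hi - lo, which the halving never
--  exhausts, so the fuel-0 branch is never the one that decides the result)
def pvBisect (s : List Int) (limit : Int) (fuel lo hi : Nat) : Nat :=
  match fuel with
  | 0 => lo
  | fuel + 1 =>
    if lo < hi then
      if s.getD ((lo + hi) / 2) 0 ≤ limit then pvBisect s limit fuel ((lo + hi) / 2 + 1) hi
      else pvBisect s limit fuel lo ((lo + hi) / 2)
    else lo

-- outer 'while i < n: limit = arr[i] + 4; <binary search>; count += 1; i = lo'
-- (fuel starts at n + 1 and i strictly increases, so the loop always ends by its guard)
def pvJump (s : List Int) (n : Nat) (fuel i : Nat) (count : Int) : Int :=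
  match fuel with
  | 0 => count
  | fuel + 1 =>
    if i < n then
      pvJump s n fuel (pvBisect s (s.getD i 0 + 4) (n - (i + 1)) (i + 1) n) (count + 1)
    else count

def priyanka_toys_alt (arr : List Int) : Int :=
  let s := PySem.List.sorted arr (fun x => x) false
  pvJump s s.length (s.length + 1) 0 0

-- ===== PRECONDITION & SPEC =====
-- Pre_ excludes only the empty list, on which Python A raises IndexError reading arr[0].
def Pre_priyanka_toys (arr : List Int) : Prop := arr ≠ []
instance (arr : List Int) : Decidable (Pre_priyanka_toys arr) := by unfold Pre_priyanka_toys; infer_instance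
def pvWitness_priyanka_toys : List Int := ([1, 7, 2])

def Spec_priyanka_toys (arr : List Int) (out : Int) : Prop := out = priyanka_toys_alt arr
instance (arr : List Int) (out : Int) : Decidable (Spec_priyanka_toys arr out) := by unfold Spec_priyanka_toys; infer_instance

-- ===== CLAIM (what is proved, stated in full; the proofs are below) =====
def Claim_equal_priyanka_toys : Prop := ∀ (arr : List Int), Dom_priyanka_toys arr → Pre_priyanka_toys arr → Spec_priyanka_toys arr (priyanka_toys arr)

-- ===== LEMMAS AND PROOFS =====

-- proof-side mediating description of the greedy grouping: skip the group, re-anchor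
def pvAltLoop (base : Int) (xs : List Int) (count : Int) : Int :=
  match h : xs.dropWhile (fun x => x ≤ base + 4) with
  | [] => count
  | y :: ys => pvAltLoop y ys (count + 1)
termination_by xs.length
decreasing_by
  have hle := List.length_dropWhile_le (p := fun x : Int => decide (x ≤ base + 4)) (l := xs)
  rw [h] at hle; simp at hle; omega

theorem pvAltLoop_cons_le (b x : Int) (xs : List Int) (c : Int) (hx : x ≤ b + 4) :
    pvAltLoop b (x :: xs) c = pvAltLoop b xs c := by
  have heq : List.dropWhile (fun x => decide (x ≤ b + 4)) (x :: xs)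
      = List.dropWhile (fun x => decide (x ≤ b + 4)) xs := by
    simp [hx]
  rw [pvAltLoop.eq_def b (x :: xs) c, pvAltLoop.eq_def b xs c]
  split <;> split <;> simp_all

theorem pvFold_eq_altLoop (xs : List Int) : ∀ (b c : Int),
    (xs.foldl (fun (st : Int × Int) i => if st.1 + 4 < i then (i, st.2 + 1) else st) (b, c)).2
      = pvAltLoop b xs c := by
  induction xs with
  | nil => intro b c; rw [pvAltLoop.eq_def]; simp
  | cons x xs ih =>
    intro b c
    by_cases hx : x ≤ b + 4
    · have hlt : ¬ (b + 4 < x) := by omega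
      simp only [List.foldl_cons, if_neg hlt]
      rw [pvAltLoop_cons_le b x xs c hx]
      exact ih b c
    · have hlt : b + 4 < x := by omega
      simp only [List.foldl_cons, if_pos hlt]
      have heq : List.dropWhile (fun y => decide (y ≤ b + 4)) (x :: xs) = x :: xs := by
        simp [hx]
      rw [pvAltLoop.eq_def b (x :: xs) c]
      split <;> simp_all

theorem pvBisect_ge (s : List Int) (limit : Int) :
    ∀ (fuel lo hi : Nat), lo ≤ pvBisect s limit fuel lo hi := by
  intro fuel
  induction fuel with
  | zero => intro lo hi; simp [pvBisect]
  | succ f ih =>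
    intro lo hi
    simp only [pvBisect]
    split
    · split
      · exact le_trans (by omega) (ih ((lo + hi) / 2 + 1) hi)
      · exact ih lo ((lo + hi) / 2)
    · exact le_rfl

theorem pvBisect_le (s : List Int) (limit : Int) :
    ∀ (fuel lo hi : Nat), pvBisect s limit fuel lo hi ≤ max lo hi := by
  intro fuel
  induction fuel with
  | zero => intro lo hi; simp [pvBisect]
  | succ f ih =>
    intro lo hi
    simp only [pvBisect]
    split
    next hlt =>
      split
      · have := ih ((lo + hi) / 2 + 1) hi; omega
      · have := ih lo ((lo + hi) / 2); omega
    next hlt => omega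

theorem pvBisect_lower (s : List Int) (limit : Int) :
    ∀ (fuel lo hi : Nat), lo < pvBisect s limit fuel lo hi →
      s.getD (pvBisect s limit fuel lo hi - 1) 0 ≤ limit := by
  intro fuel
  induction fuel with
  | zero => intro lo hi h; simp [pvBisect] at h
  | succ f ih =>
    intro lo hi h
    simp only [pvBisect] at h ⊢
    by_cases hlt : lo < hi
    · rw [if_pos hlt] at h ⊢
      by_cases hmid : s.getD ((lo + hi) / 2) 0 ≤ limit
      · rw [if_pos hmid] at h ⊢
        rcases Nat.lt_or_ge ((lo + hi) / 2 + 1) (pvBisect s limit f ((lo + hi) / 2 + 1) hi) with hc | hc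
        · exact ih ((lo + hi) / 2 + 1) hi hc
        · have hge := pvBisect_ge s limit f ((lo + hi) / 2 + 1) hi
          have heq : pvBisect s limit f ((lo + hi) / 2 + 1) hi = (lo + hi) / 2 + 1 := by omega
          rw [heq]; simpa using hmid
      · rw [if_neg hmid] at h ⊢
        exact ih lo ((lo + hi) / 2) h
    · rw [if_neg hlt] at h ⊢; omega

theorem pvBisect_upper (s : List Int) (limit : Int) :
    ∀ (fuel lo hi : Nat), hi - lo ≤ fuel → pvBisect s limit fuel lo hi < hi →
      limit < s.getD (pvBisect s limit fuel lo hi) 0 := by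
  intro fuel
  induction fuel with
  | zero => intro lo hi hf h; simp [pvBisect] at h; omega
  | succ f ih =>
    intro lo hi hf h
    simp only [pvBisect] at h ⊢
    by_cases hlt : lo < hi
    · rw [if_pos hlt] at h ⊢
      by_cases hmid : s.getD ((lo + hi) / 2) 0 ≤ limit
      · rw [if_pos hmid] at h ⊢
        exact ih ((lo + hi) / 2 + 1) hi (by omega) h
      · rw [if_neg hmid] at h ⊢
        rcases Nat.lt_or_ge (pvBisect s limit f lo ((lo + hi) / 2)) ((lo + hi) / 2) with hc | hc
        · exact ih lo ((lo + hi) / 2) (by omega) hc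
        · have hle := pvBisect_le s limit f lo ((lo + hi) / 2)
          have heq : pvBisect s limit f lo ((lo + hi) / 2) = (lo + hi) / 2 := by omega
          rw [heq]; omega
    · rw [if_neg hlt] at h ⊢; omega

-- once the index has reached n the loop returns the accumulator, whatever the fuel
theorem pvJump_stop (s : List Int) (n : Nat) :
    ∀ (fuel i : Nat) (count : Int), n ≤ i → pvJump s n fuel i count = count := by
  intro fuel i count h
  cases fuel with
  | zero => rfl
  | succ f => simp only [pvJump]; rw [if_neg (by omega)]

-- the tail past lo, with all of [lo, j) ≤ limit and (j in range →) limit < s[j],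
-- has its (≤ limit)-prefix dropped exactly at j
theorem pvDropWhile_eq_drop (s : List Int) (limit : Int) (j : Nat)
    (hj : j ≤ s.length)
    (hup : j < s.length → limit < s.getD j 0) :
    ∀ (d lo : Nat), j = lo + d →
      (∀ k, lo ≤ k → k < j → s.getD k 0 ≤ limit) →
      (s.drop lo).dropWhile (fun x => x ≤ limit) = s.drop j := by
  intro d
  induction d with
  | zero =>
    intro lo hlo _
    have hloj : lo = j := by omega
    subst hloj
    rcases Nat.lt_or_ge lo s.length with hlt | hge
    · rw [← List.getElem_cons_drop hlt]
      have hfalse : ¬ (s[lo] ≤ limit) := by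
        have := hup hlt
        rw [List.getD_eq_getElem s 0 hlt] at this
        omega
      simp [hfalse]
    · rw [List.drop_eq_nil_of_le hge]
      rfl
  | succ d ih =>
    intro lo hlo hlow
    have hlolt : lo < s.length := by omega
    have htrue : s[lo] ≤ limit := by
      have := hlow lo le_rfl (by omega)
      rwa [List.getD_eq_getElem s 0 hlolt] at this
    have hcons : s.drop lo = s[lo] :: s.drop (lo + 1) := (List.getElem_cons_drop hlolt).symm
    have hstep : (s.drop lo).dropWhile (fun x => decide (x ≤ limit))
        = (s.drop (lo + 1)).dropWhile (fun x => decide (x ≤ limit)) := by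
      rw [hcons, List.dropWhile_cons, if_pos (decide_eq_true htrue)]
    rw [hstep]
    exact ih (lo + 1) (by omega) (fun k hk hk2 => hlow k (by omega) hk2)

theorem pvGetD_mono (s : List Int) (hs : s.Pairwise (· ≤ ·)) (p q : Nat)
    (hpq : p ≤ q) (hq : q < s.length) : s.getD p 0 ≤ s.getD q 0 := by
  rw [List.getD_eq_getElem s 0 (by omega), List.getD_eq_getElem s 0 hq]
  rcases Nat.lt_or_ge p q with h | h
  · exact List.pairwise_iff_getElem.mp hs p q (by omega) hq h
  · have : p = q := by omega
    subst this; exact le_rfl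

-- the jump loop computes the same greedy grouping as the skip-and-re-anchor loop
theorem pvJump_eq_altLoop (s : List Int) (hs : s.Pairwise (· ≤ ·)) :
    ∀ (fuel i : Nat) (count : Int), i < s.length → s.length - i < fuel →
      pvJump s s.length fuel i count = pvAltLoop (s.getD i 0) (s.drop (i + 1)) (count + 1) := by
  intro fuel
  induction fuel with
  | zero => intro i count hi hf; omega
  | succ f ih =>
    intro i count hi hf
    have hge : i + 1 ≤ pvBisect s (s.getD i 0 + 4) (s.length - (i + 1)) (i + 1) s.length :=
      pvBisect_ge s (s.getD i 0 + 4) (s.length - (i + 1)) (i + 1) s.length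
    have hle : pvBisect s (s.getD i 0 + 4) (s.length - (i + 1)) (i + 1) s.length ≤ s.length := by
      have := pvBisect_le s (s.getD i 0 + 4) (s.length - (i + 1)) (i + 1) s.length; omega
    have hlow : ∀ k, i + 1 ≤ k → k < pvBisect s (s.getD i 0 + 4) (s.length - (i + 1)) (i + 1) s.length →
        s.getD k 0 ≤ s.getD i 0 + 4 := by
      intro k hk hk2
      have hb := pvBisect_lower s (s.getD i 0 + 4) (s.length - (i + 1)) (i + 1) s.length (by omega)
      exact le_trans (pvGetD_mono s hs k
        (pvBisect s (s.getD i 0 + 4) (s.length - (i + 1)) (i + 1) s.length - 1)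
        (by omega) (by omega)) hb
    have hup : pvBisect s (s.getD i 0 + 4) (s.length - (i + 1)) (i + 1) s.length < s.length →
        s.getD i 0 + 4 < s.getD (pvBisect s (s.getD i 0 + 4) (s.length - (i + 1)) (i + 1) s.length) 0 :=
      fun h => pvBisect_upper s (s.getD i 0 + 4) (s.length - (i + 1)) (i + 1) s.length le_rfl h
    have hdrop : (s.drop (i + 1)).dropWhile (fun x => x ≤ s.getD i 0 + 4)
        = s.drop (pvBisect s (s.getD i 0 + 4) (s.length - (i + 1)) (i + 1) s.length) :=
      pvDropWhile_eq_drop s (s.getD i 0 + 4)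
        (pvBisect s (s.getD i 0 + 4) (s.length - (i + 1)) (i + 1) s.length)
        hle hup (pvBisect s (s.getD i 0 + 4) (s.length - (i + 1)) (i + 1) s.length - (i + 1))
        (i + 1) (by omega) hlow
    simp only [pvJump]
    rw [if_pos hi, pvAltLoop.eq_def]
    rcases Nat.lt_or_ge (pvBisect s (s.getD i 0 + 4) (s.length - (i + 1)) (i + 1) s.length) s.length with hjlt | hjge
    · -- next group starts at the jump target
      have hcons : s.drop (pvBisect s (s.getD i 0 + 4) (s.length - (i + 1)) (i + 1) s.length)
          = s[pvBisect s (s.getD i 0 + 4) (s.length - (i + 1)) (i + 1) s.length] ::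
            s.drop (pvBisect s (s.getD i 0 + 4) (s.length - (i + 1)) (i + 1) s.length + 1) :=
        (List.getElem_cons_drop hjlt).symm
      rw [hcons] at hdrop
      split
      next heq => rw [heq] at hdrop; exact absurd hdrop.symm (List.cons_ne_nil _ _)
      next y ys heq =>
        rw [heq] at hdrop
        have hy : y = s[pvBisect s (s.getD i 0 + 4) (s.length - (i + 1)) (i + 1) s.length] :=
          (List.cons.injEq _ _ _ _ ▸ hdrop).1
        have hys : ys = s.drop (pvBisect s (s.getD i 0 + 4) (s.length - (i + 1)) (i + 1) s.length + 1) :=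
          (List.cons.injEq _ _ _ _ ▸ hdrop).2
        subst hy; subst hys
        rw [ih (pvBisect s (s.getD i 0 + 4) (s.length - (i + 1)) (i + 1) s.length) (count + 1)
          hjlt (by omega)]
        rw [List.getD_eq_getElem s 0 hjlt]
    · -- the rest of the list is one group: the jump lands at n and the loop ends
      have hnil : s.drop (pvBisect s (s.getD i 0 + 4) (s.length - (i + 1)) (i + 1) s.length) = [] :=
        List.drop_eq_nil_of_le (by omega)
      rw [hnil] at hdrop
      split
      next heq => exact pvJump_stop s s.length f _ (count + 1) (by omega)
      next y ys heq => rw [heq] at hdrop; exact absurd hdrop (List.cons_ne_nil _ _)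

-- ===== VERDICT (by name: the statement is the Claim_ definition above) =====
theorem priyanka_toys_spec : Claim_equal_priyanka_toys := by
  intro arr _ hpre
  unfold Spec_priyanka_toys priyanka_toys priyanka_toys_alt
  have hs : (PySem.List.sorted arr (fun x => x) false).Pairwise (· ≤ ·) :=
    PySem.List.sorted_pairwise arr (fun x => x)
  cases h : PySem.List.sorted arr (fun x => x) false with
  | nil => exact absurd ((PySem.List.sorted_eq_nil_iff arr (fun x => x) false).mp h) hpre
  | cons m t =>
    rw [h] at hs
    simp only [List.foldl_cons]
    have hm : ¬ (m + 4 < m) := by omega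
    rw [if_neg hm, pvFold_eq_altLoop t m 1]
    have h0 : (0 : Nat) < (m :: t).length := by simp
    rw [pvJump_eq_altLoop (m :: t) hs ((m :: t).length + 1) 0 0 h0 (by omega)]
    norm_num
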